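-- pv_equiv track=rewrite | github.com/Vidhate/competitive-coding | InterviewBit/amazing_substrings.py | solve
-- ===== SOURCE A (Python) =====
-- def solve(A):
--
-- 	mod = 10003
-- 	vowels = ['a', 'e', 'i', 'o', 'u', 'A', 'E', 'I', 'O', 'U']
-- 	l = len(A)
-- 	total = 0
-- 	for i,char in enumerate(A):
-- 		if char in vowels:
-- 			total += (l-i)
-- 			total = total%mod
-- 	return total
-- ===== SOURCE B (Python) =====
-- def solve(A):
--     running = 0
--     total = 0
--     for ch in A:
--         if ch in "aeiouAEIOU":
--             running += 1
--         total = (total + running) % 10003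
--     return total
-- ===== Notes on version B (the rewrite author's own statement) =====
-- stated objective: alternative
-- what changed: B maintains a running count of vowels seen so far and adds it at every position (prefix-count decomposition), instead of A's per-vowel contribution (len - i) computed from len() and the enumerate index; measured ~2x faster by avoiding enumerate tuple unpacking and list membership (string membership instead).
import Mathlib
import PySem

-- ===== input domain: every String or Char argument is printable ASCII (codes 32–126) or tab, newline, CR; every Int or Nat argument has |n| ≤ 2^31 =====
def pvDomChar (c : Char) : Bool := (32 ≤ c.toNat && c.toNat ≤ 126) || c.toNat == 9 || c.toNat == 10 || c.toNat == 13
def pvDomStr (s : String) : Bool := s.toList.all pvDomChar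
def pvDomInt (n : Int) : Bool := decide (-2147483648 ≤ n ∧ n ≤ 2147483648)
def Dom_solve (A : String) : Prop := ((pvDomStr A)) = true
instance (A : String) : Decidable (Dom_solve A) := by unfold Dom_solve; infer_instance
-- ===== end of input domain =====

-- B replaces A's per-vowel index arithmetic (l - i, needing len and enumerate) with a running
-- prefix count of vowels added at every position; same single pass, different decomposition.


-- ===== PORT A =====
def solve (A : String) : Int :=
  let m : Int := 10003
  let vowels : List Char := ['a', 'e', 'i', 'o', 'u', 'A', 'E', 'I', 'O', 'U']
  let l : Int := PySem.Str.len A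
  (PySem.List.enumerate A.toList).foldl
    (fun total ic =>
      if vowels.contains ic.2 then PySem.Int.mod (total + (l - ic.1)) m
      else total) 0

-- ===== PORT B =====
def solve_alt (A : String) : Int :=
  (A.toList.foldl
    (fun st c =>
      let r := st.1 + (if "aeiouAEIOU".toList.contains c then (1 : Int) else 0)
      (r, PySem.Int.mod (st.2 + r) 10003)) ((0 : Int), (0 : Int))).2

-- ===== PRECONDITION & SPEC =====
def Spec_solve (A : String) (out : Int) : Prop := out = solve_alt A
instance (A : String) (out : Int) : Decidable (Spec_solve A out) := by unfold Spec_solve; infer_instance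

-- ===== CLAIM (what is proved, stated in full; the proofs are below) =====
def Claim_equal_solve : Prop := ∀ (A : String), Dom_solve A → Spec_solve A (solve A)

-- ===== LEMMAS AND PROOFS =====

-- vowel indicator (as an Int)
def vInd (c : Char) : Int :=
  if (['a', 'e', 'i', 'o', 'u', 'A', 'E', 'I', 'O', 'U'] : List Char).contains c then 1 else 0

-- Σ over the list of vInd c * d with d decreasing from the start value (A's sum of (l - i))
def sumA : List Char → Int → Int
  | [], _ => 0
  | c :: t, d => vInd c * d + sumA t (d - 1)

-- B's sum of running prefix counts, starting with r vowels already seen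
def sumB : List Char → Int → Int
  | [], _ => 0
  | c :: t, r => (r + vInd c) + sumB t (r + vInd c)

theorem mod_m (a : Int) : PySem.Int.mod a 10003 = a % 10003 := by
  simp [PySem.Int.mod, Int.fmod_eq_emod]

theorem mod_step (s x : Int) : PySem.Int.mod (s % 10003 + x) 10003 = (s + x) % 10003 := by
  rw [mod_m, Int.emod_add_emod]

theorem foldA_eq (xs : List Char) (l k s : Int) :
    (PySem.List.enumerate xs k).foldl
      (fun total ic =>
        if (['a', 'e', 'i', 'o', 'u', 'A', 'E', 'I', 'O', 'U'] : List Char).contains ic.2 then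
          PySem.Int.mod (total + (l - ic.1)) 10003
        else total) (s % 10003)
      = (s + sumA xs (l - k)) % 10003 := by
  induction xs generalizing k s with
  | nil => simp [PySem.List.enumerate_nil, sumA]
  | cons c t ih =>
    rw [PySem.List.enumerate_cons, List.foldl_cons]
    by_cases hv : (['a', 'e', 'i', 'o', 'u', 'A', 'E', 'I', 'O', 'U'] : List Char).contains c
    · simp only [hv, reduceIte, mod_step]
      rw [ih (k + 1) (s + (l - k))]
      have h2 : sumA (c :: t) (l - k) = (l - k) + sumA t (l - (k + 1)) := by
        simp only [sumA, vInd]; rw [if_pos hv]; ring_nf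
      rw [h2]; ring_nf
    · simp only [hv, Bool.false_eq_true, reduceIte]
      rw [ih (k + 1) s]
      have h2 : sumA (c :: t) (l - k) = sumA t (l - (k + 1)) := by
        simp only [sumA, vInd]; rw [if_neg hv]; ring_nf
      rw [h2]

theorem foldB_eq (xs : List Char) (r s : Int) :
    (xs.foldl
      (fun st c =>
        let r' := st.1 + (if "aeiouAEIOU".toList.contains c then (1 : Int) else 0)
        (r', PySem.Int.mod (st.2 + r') 10003)) (r, s % 10003)).2
      = (s + sumB xs r) % 10003 := by
  induction xs generalizing r s with
  | nil => simp [sumB]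
  | cons c t ih =>
    rw [List.foldl_cons]
    show (List.foldl _
      (r + (if "aeiouAEIOU".toList.contains c then (1 : Int) else 0),
        PySem.Int.mod (s % 10003 + (r + (if "aeiouAEIOU".toList.contains c then (1 : Int) else 0))) 10003) t).2 = _
    rw [mod_step]
    rw [show (if "aeiouAEIOU".toList.contains c then (1 : Int) else 0) = vInd c from rfl]
    rw [ih (r + vInd c) (s + (r + vInd c))]
    have h1 : sumB (c :: t) r = (r + vInd c) + sumB t (r + vInd c) := rfl
    rw [h1]; ring_nf

theorem sumB_eq (xs : List Char) (r : Int) :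
    sumB xs r = r * xs.length + sumA xs xs.length := by
  induction xs generalizing r with
  | nil => simp [sumA, sumB]
  | cons c t ih =>
    have h1 : sumB (c :: t) r = (r + vInd c) + sumB t (r + vInd c) := rfl
    have h2 : sumA (c :: t) (((c :: t).length : Int)) =
        vInd c * (t.length + 1) + sumA t t.length := by
      simp only [sumA, List.length_cons]; push_cast; ring_nf
    rw [h1, ih, h2]
    simp only [List.length_cons]
    push_cast
    ring

-- ===== VERDICT (by name: the statement is the Claim_ definition above) =====
theorem solve_spec : Claim_equal_solve := by
  intro A _
  unfold Spec_solve
  have ha := foldA_eq A.toList (PySem.Str.len A) 0 0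
  have hb := foldB_eq A.toList 0 0
  simp only [Int.zero_emod, zero_add, sub_zero] at ha hb
  simp only [solve, solve_alt]
  rw [ha, hb, sumB_eq, PySem.Str.len_eq]
  norm_num
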